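-- pv_equiv track=rewrite | github.com/HakSoo-Kim1/Coding-interview-practices | MarathonProblem.py | solution
-- ===== SOURCE A (Python) =====
-- def solution(participant, completion):
--     empty = []
--     newParticipant = participant.copy()
--     for runner in participant:
--         if (runner in completion and runner not in empty):
--             newParticipant.remove(runner)
--             empty.append(runner)
--     return newParticipant[0]
-- ===== SOURCE B (Python) =====
-- def solution(participant, completion):
--     # Flip the traversal: walk the DISTINCT finisher names and delete one
--     # occurrence of each from a copy of participant; the lone survivor's
--     # first occurrence is the answer.
--     result = participant.copy()
--     for name in set(completion):
--         if name in result: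
--             result.remove(name)
--     return result[0]
-- ===== Notes on version B (the rewrite author's own statement) =====
-- stated objective: alternative
-- what changed: B flips the traversal: instead of A's loop over participants with an 'in completion' scan, an 'in empty' seen-list scan and a remove per runner, B loops once over the distinct completion names and deletes one occurrence of each from a copy of participant; removal order is immaterial, so the surviving list matches A's exactly.
import Mathlib
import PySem

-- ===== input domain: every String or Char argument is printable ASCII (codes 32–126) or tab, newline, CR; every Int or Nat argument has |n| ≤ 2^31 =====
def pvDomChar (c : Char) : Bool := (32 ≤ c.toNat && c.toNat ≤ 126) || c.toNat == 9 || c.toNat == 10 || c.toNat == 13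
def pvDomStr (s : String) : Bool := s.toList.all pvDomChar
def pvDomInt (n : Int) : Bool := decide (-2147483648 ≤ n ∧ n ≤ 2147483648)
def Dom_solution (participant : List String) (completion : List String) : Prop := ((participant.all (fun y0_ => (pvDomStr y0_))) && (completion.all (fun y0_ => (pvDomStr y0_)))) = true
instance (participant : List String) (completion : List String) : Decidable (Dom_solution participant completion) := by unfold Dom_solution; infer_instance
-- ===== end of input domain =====

-- B flips the traversal: it walks the distinct finisher names and deletes one
-- occurrence of each from a copy of participant, instead of A's per-runner
-- membership scans with a seen-list (alternative decomposition, same result).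

-- ===== PORT A =====
-- A's loop state: (newParticipant, empty); list.remove ported by
-- PySem.List.remove? (A's guard guarantees membership, so .getD is on an
-- unreachable branch).
def solutionStepA (completion : List String) (st : List String × List String) (runner : String) : List String × List String :=
  if runner ∈ completion ∧ runner ∉ st.2 then
    ((PySem.List.remove? st.1 runner).getD st.1, st.2 ++ [runner])
  else st

def solution (participant : List String) (completion : List String) : String :=
  (PySem.List.pyGet? (participant.foldl (solutionStepA completion) (participant, [])).1 0).getD ""

-- ===== PORT B =====
-- B's loop: over set(completion), state = the shrinking result list.
def solutionStepB (res : List String) (name : String) : List String :=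
  if name ∈ res then (PySem.List.remove? res name).getD res else res

def solution_alt (participant : List String) (completion : List String) : String :=
  (PySem.List.pyGet? ((PySem.Set.ofList completion).foldl solutionStepB participant) 0).getD ""

-- ===== PRECONDITION & SPEC =====
-- Pre_ excludes exactly the inputs where every participant is matched by a
-- distinct completion name, so the surviving list is empty and Python's
-- `[0]` raises IndexError (both in A and in B).
def Pre_solution (participant : List String) (completion : List String) : Prop :=
  ((PySem.Set.ofList completion).filter (fun c => decide (c ∈ participant))).length < participant.length
instance (participant : List String) (completion : List String) : Decidable (Pre_solution participant completion) := by unfold Pre_solution; infer_instance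
def pvWitness_solution : List String × List String := (["leo", "kiki", "eden"], ["eden", "kiki"])

def Spec_solution (participant : List String) (completion : List String) (out : String) : Prop := out = solution_alt participant completion
instance (participant : List String) (completion : List String) (out : String) : Decidable (Spec_solution participant completion out) := by unfold Spec_solution; infer_instance

-- ===== CLAIM (what is proved, stated in full; the proofs are below) =====
def Claim_equal_solution : Prop := ∀ (participant : List String) (completion : List String), Dom_solution participant completion → Pre_solution participant completion → Spec_solution participant completion (solution participant completion)

-- ===== LEMMAS AND PROOFS =====

-- Both step functions are List.erase (remove? + getD is erase in both branches).
lemma remove_getD_eq_erase (l : List String) (a : String) :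
    (PySem.List.remove? l a).getD l = l.erase a := by
  by_cases h : a ∈ l
  · rw [PySem.List.remove?_eq_some_erase _ _ h, Option.getD_some]
  · rw [(PySem.List.remove?_eq_none_iff l a).2 h, Option.getD_none, List.erase_of_not_mem h]

lemma stepB_eq_erase (res : List String) (name : String) :
    solutionStepB res name = res.erase name := by
  unfold solutionStepB
  by_cases h : name ∈ res
  · rw [if_pos h, remove_getD_eq_erase]
  · rw [if_neg h, List.erase_of_not_mem h]

-- folding erase is invariant under permutation of the erased names
lemma foldl_erase_perm {l1 l2 : List String} (h : l1.Perm l2) :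
    ∀ cur : List String, l1.foldl List.erase cur = l2.foldl List.erase cur := by
  induction h with
  | nil => intro cur; rfl
  | cons a _ ih => intro cur; simpa using ih (cur.erase a)
  | swap a b l => intro cur; simp [List.erase_comm]
  | trans _ _ ih1 ih2 => intro cur; rw [ih1, ih2]

-- names failing a predicate that holds on all of cur erase nothing
lemma foldl_erase_filter (P : String → Bool) :
    ∀ (S cur : List String), (∀ x ∈ cur, P x) →
      S.foldl List.erase cur = (S.filter P).foldl List.erase cur := by
  intro S
  induction S with
  | nil => intro cur _; rfl
  | cons a S ih =>
    intro cur hcur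
    by_cases ha : P a
    · simp only [List.foldl_cons, List.filter_cons, ha, if_pos]
      exact ih (cur.erase a) (fun x hx => hcur x (List.mem_of_mem_erase hx))
    · have : a ∉ cur := fun h => ha (hcur a h)
      simp only [List.foldl_cons, List.filter_cons, ha, Bool.false_eq_true,
        List.erase_of_not_mem this]
      exact ih cur hcur

-- the distinct names A actually removes, in the order it removes them
def removedA (completion : List String) : List String → List String → List String
  | [], _ => []
  | r :: s, empty =>
    if r ∈ completion ∧ r ∉ empty then r :: removedA completion s (empty ++ [r])
    else removedA completion s empty

lemma loopA_eq_foldl_erase (completion : List String) :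
    ∀ (s cur empty : List String),
      (s.foldl (solutionStepA completion) (cur, empty)).1
        = (removedA completion s empty).foldl List.erase cur := by
  intro s
  induction s with
  | nil => intro cur empty; rfl
  | cons r s ih =>
    intro cur empty
    by_cases hg : r ∈ completion ∧ r ∉ empty
    · simp only [List.foldl_cons, solutionStepA, if_pos hg, removedA, remove_getD_eq_erase]
      exact ih (cur.erase r) (empty ++ [r])
    · simp only [List.foldl_cons, solutionStepA, if_neg hg, removedA]
      exact ih cur empty

lemma mem_removedA (completion : List String) :
    ∀ (s empty : List String) (x : String),
      x ∈ removedA completion s empty ↔ x ∈ s ∧ x ∈ completion ∧ x ∉ empty := by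
  intro s
  induction s with
  | nil => intro empty x; simp [removedA]
  | cons r s ih =>
    intro empty x
    by_cases hg : r ∈ completion ∧ r ∉ empty
    · simp only [removedA, if_pos hg, List.mem_cons, ih, List.mem_append, not_or]
      by_cases hx : x = r
      · subst hx; simp [hg.1, hg.2]
      · simp [hx]
    · simp only [removedA, if_neg hg, ih, List.mem_cons]
      by_cases hx : x = r
      · subst hx; simp; tauto
      · simp [hx]

lemma nodup_removedA (completion : List String) :
    ∀ (s empty : List String), (removedA completion s empty).Nodup := by
  intro s
  induction s with
  | nil => intro empty; simp [removedA]
  | cons r s ih =>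
    intro empty
    by_cases hg : r ∈ completion ∧ r ∉ empty
    · simp only [removedA, if_pos hg, List.nodup_cons]
      refine ⟨fun hm => ?_, ih (empty ++ [r])⟩
      exact ((mem_removedA completion s (empty ++ [r]) r).1 hm).2.2 (by simp)
    · simp only [removedA, if_neg hg]
      exact ih empty

-- ===== VERDICT (by name: the statement is the Claim_ definition above) =====
theorem solution_spec : Claim_equal_solution := by
  intro participant completion _ _
  show solution participant completion = solution_alt participant completion
  unfold solution solution_alt
  have hB : (PySem.Set.ofList completion).foldl solutionStepB participant
      = (PySem.Set.ofList completion).foldl List.erase participant := by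
    simp [funext_iff.2 (fun res => funext_iff.2 (stepB_eq_erase res))]
  have hA := loopA_eq_foldl_erase completion participant participant []
  have hperm : (removedA completion participant []).Perm
      ((PySem.Set.ofList completion).filter (fun c => decide (c ∈ participant))) := by
    rw [List.perm_ext_iff_of_nodup (nodup_removedA completion participant [])
      ((PySem.Set.nodup_ofList completion).filter _)]
    intro x
    rw [mem_removedA, List.mem_filter, PySem.Set.mem_ofList]
    simp; tauto
  rw [hA, hB, foldl_erase_perm hperm,
    ← foldl_erase_filter (fun c => decide (c ∈ participant)) _ participant
      (fun x hx => by simpa using hx)]
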